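-- pv_equiv track=rewrite | github.com/benoitdebecker1995-png/history-vs-hype | tools/history-clip-tool/src/api/routes/ui.py | translate_reasons
-- ===== SOURCE A (Python) =====
-- from typing import List, Dict
--
-- REASON_MAP = {
--     "Contains primary source reference": "Mentions a primary source",
--     "References specific date": "References a specific date",
--     "Citation language detected": "Cites a scholar or study",
--     "Quantitative data": "Includes specific numbers or statistics",
--     "Legal/technical terminology": "Uses precise legal or historical terms",
--     "Causal explanation": "Explains cause and effect",
--     "Myth-debunking pattern": "Challenges a common misconception",
--     "Comparative analysis": "Compares different perspectives or periods",
--     "Conclusion signal": "Draws a clear conclusion",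
--     "Complete sentence": "Forms a complete thought",
--     "Optimal duration": "Good length for a short video",
-- }
--
-- def translate_reasons(technical_reasons: List[str]) -> List[str]:
--     """
--     Convert technical scoring reasons to user-friendly language.
--
--     Args:
--         technical_reasons: List of technical reason strings
--
--     Returns:
--         List of human-readable reasons (only positive ones)
--     """
--     friendly_reasons = []
--
--     for reason in technical_reasons:
--         # Skip penalties and technical details
--         if any(skip in reason.lower() for skip in ['(-', 'incomplete', 'too short', 'too long']):
--             continue
--
--         # Find matching pattern
--         for pattern, friendly in REASON_MAP.items():
--             if pattern.lower() in reason.lower():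
--                 if friendly not in friendly_reasons:
--                     friendly_reasons.append(friendly)
--                 break
--         else:
--             # If no exact match, try to extract positive aspects
--             if '(+' in reason and 'detected' in reason.lower():
--                 # Generic positive detection
--                 if "Forms a complete thought" not in friendly_reasons:
--                     friendly_reasons.append("Forms a complete thought")
--
--     # Limit to 4-5 most important reasons
--     return friendly_reasons[:5]
-- ===== SOURCE B (Python) =====
-- from typing import List, Optional
--
-- REASON_MAP = {
--     "Contains primary source reference": "Mentions a primary source",
--     "References specific date": "References a specific date",
--     "Citation language detected": "Cites a scholar or study",
--     "Quantitative data": "Includes specific numbers or statistics",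
--     "Legal/technical terminology": "Uses precise legal or historical terms",
--     "Causal explanation": "Explains cause and effect",
--     "Myth-debunking pattern": "Challenges a common misconception",
--     "Comparative analysis": "Compares different perspectives or periods",
--     "Conclusion signal": "Draws a clear conclusion",
--     "Complete sentence": "Forms a complete thought",
--     "Optimal duration": "Good length for a short video",
-- }
--
-- SKIP_TOKENS = ('(-', 'incomplete', 'too short', 'too long')
--
--
-- def translate_one(reason: str) -> Optional[str]:
--     """Friendly phrase for a single technical reason, or None to drop it."""
--     low = reason.lower()
--     if any(tok in low for tok in SKIP_TOKENS):
--         return None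
--     match = next((friendly for pattern, friendly in REASON_MAP.items()
--                   if pattern.lower() in low), None)
--     if match is not None:
--         return match
--     if '(+' in reason and 'detected' in low:
--         return "Forms a complete thought"
--     return None
--
--
-- def take_distinct(vals: List[str], k: int) -> List[str]:
--     """First k distinct values: emit the head, strip its later copies, recurse.
--     Stops as soon as k phrases are emitted, so no seen-set is ever kept."""
--     if k == 0 or not vals:
--         return []
--     head, rest = vals[0], vals[1:]
--     return [head] + take_distinct([v for v in rest if v != head], k - 1)
--
--
-- def translate_reasons(technical_reasons: List[str]) -> List[str]:
--     vals = [f for f in map(translate_one, technical_reasons) if f is not None]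
--     return take_distinct(vals, 5)
-- ===== Notes on version B (the rewrite author's own statement) =====
-- stated objective: alternative
-- what changed: B replaces A's single accumulating loop (seen-list membership dedupe, then [:5]) by staged passes: a pure per-reason classifier mapped over the input, then a recursive take_distinct that emits the head, strips its later duplicates and recurses with a budget of 5 — no seen-collection and no post-hoc slice, dedup and cap are fused with early termination.
import Mathlib
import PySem

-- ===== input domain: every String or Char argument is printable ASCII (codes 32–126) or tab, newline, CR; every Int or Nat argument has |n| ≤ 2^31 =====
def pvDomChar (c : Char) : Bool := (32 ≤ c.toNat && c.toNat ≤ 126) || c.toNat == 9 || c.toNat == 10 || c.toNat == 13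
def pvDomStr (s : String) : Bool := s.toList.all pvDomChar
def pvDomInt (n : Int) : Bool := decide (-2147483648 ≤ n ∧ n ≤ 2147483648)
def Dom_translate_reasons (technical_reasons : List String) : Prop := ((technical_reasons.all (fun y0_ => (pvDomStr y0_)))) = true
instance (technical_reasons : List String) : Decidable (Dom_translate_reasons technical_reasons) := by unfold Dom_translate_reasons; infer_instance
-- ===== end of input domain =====

-- B replaces A's single accumulating loop by a pure per-reason classifier mapped over
-- the input plus a recursive take_distinct (emit head, strip its later copies, recurse
-- with a budget of 5) — no seen-list and no post-hoc slice (objective: alternative).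


-- shared module constant REASON_MAP (dict, insertion order = this list)
def pvReasonMap : List (String × String) := [
  ("Contains primary source reference", "Mentions a primary source"),
  ("References specific date", "References a specific date"),
  ("Citation language detected", "Cites a scholar or study"),
  ("Quantitative data", "Includes specific numbers or statistics"),
  ("Legal/technical terminology", "Uses precise legal or historical terms"),
  ("Causal explanation", "Explains cause and effect"),
  ("Myth-debunking pattern", "Challenges a common misconception"),
  ("Comparative analysis", "Compares different perspectives or periods"),
  ("Conclusion signal", "Draws a clear conclusion"),
  ("Complete sentence", "Forms a complete thought"),
  ("Optimal duration", "Good length for a short video")]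

def pvSkips : List String := ["(-", "incomplete", "too short", "too long"]

-- ===== PORT A =====
-- inner for-else over REASON_MAP.items(): first friendly whose pattern.lower() is in low
def pvFindMatch : List (String × String) → String → Option String
  | [], _ => none
  | (pattern, friendly) :: rest, low =>
      if PySem.Str.isIn (PySem.Str.lower pattern) low then some friendly
      else pvFindMatch rest low

-- body of A's 'for reason in technical_reasons' loop, acc = friendly_reasons
def pvAStep (acc : List String) (reason : String) : List String :=
  if pvSkips.any (fun skip => PySem.Str.isIn skip (PySem.Str.lower reason)) then acc
  else
    match pvFindMatch pvReasonMap (PySem.Str.lower reason) with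
    | some friendly => if acc.contains friendly then acc else acc ++ [friendly]
    | none =>
        if PySem.Str.isIn "(+" reason && PySem.Str.isIn "detected" (PySem.Str.lower reason) then
          if acc.contains "Forms a complete thought" then acc
          else acc ++ ["Forms a complete thought"]
        else acc

def translate_reasons (technical_reasons : List String) : List String :=
  PySem.List.slice (technical_reasons.foldl pvAStep []) none (some 5)

-- ===== PORT B =====
-- Source B: translate_one — friendly phrase for one reason, or none to drop it
def translate_one (reason : String) : Option String :=
  let low := PySem.Str.lower reason
  if pvSkips.any (fun tok => PySem.Str.isIn tok low) then none
  else
    match (pvReasonMap.find? (fun pf => PySem.Str.isIn (PySem.Str.lower pf.1) low)).map Prod.snd with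
    | some m => some m
    | none =>
        if PySem.Str.isIn "(+" reason && PySem.Str.isIn "detected" low then
          some "Forms a complete thought"
        else none

-- Source B: take_distinct — first k distinct values by head-emission and duplicate stripping
def take_distinct : List String → Nat → List String
  | _, 0 => []
  | [], _ + 1 => []
  | h :: t, k + 1 => h :: take_distinct (t.filter (fun v => v != h)) k

def translate_reasons_alt (technical_reasons : List String) : List String :=
  take_distinct (technical_reasons.filterMap translate_one) 5

-- ===== PRECONDITION & SPEC =====
def Spec_translate_reasons (technical_reasons : List String) (out : List String) : Prop := out = translate_reasons_alt technical_reasons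
instance (technical_reasons : List String) (out : List String) : Decidable (Spec_translate_reasons technical_reasons out) := by unfold Spec_translate_reasons; infer_instance

-- ===== CLAIM (what is proved, stated in full; the proofs are below) =====
def Claim_equal_translate_reasons : Prop := ∀ (technical_reasons : List String), Dom_translate_reasons technical_reasons → Spec_translate_reasons technical_reasons (translate_reasons technical_reasons)

-- ===== LEMMAS AND PROOFS =====
-- A's inner for-else computes the first match of B's find?-scan
theorem pvFindMatch_eq (l : List (String × String)) (low : String) :
    pvFindMatch l low = (l.find? (fun pf => PySem.Str.isIn (PySem.Str.lower pf.1) low)).map Prod.snd := by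
  induction l with
  | nil => rfl
  | cons pf rest ih =>
      obtain ⟨p, f⟩ := pf
      simp only [pvFindMatch, List.find?]
      cases h : PySem.Str.isIn (PySem.Str.lower p) low <;> simp [ih]

-- A's loop body is exactly "add translate_one's value to the seen-set, if any"
theorem pvAStep_eq (acc : List String) (reason : String) :
    pvAStep acc reason =
      match translate_one reason with
      | none => acc
      | some f => PySem.Set.add acc f := by
  simp only [pvAStep, translate_one, pvFindMatch_eq]
  cases hskip : pvSkips.any (fun tok => PySem.Str.isIn tok (PySem.Str.lower reason)) with
  | true => simp
  | false =>
      cases hfind : (pvReasonMap.find? (fun pf => PySem.Str.isIn (PySem.Str.lower pf.1) (PySem.Str.lower reason))).map Prod.snd with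
      | some f => simp [PySem.Set.add, PySem.Set.contains]
      | none =>
          cases hplus : PySem.Str.isIn "(+" reason && PySem.Str.isIn "detected" (PySem.Str.lower reason) <;>
            simp [PySem.Set.add, PySem.Set.contains]

theorem pvFold_eq (rs : List String) : ∀ acc : List String,
    rs.foldl pvAStep acc = (rs.filterMap translate_one).foldl PySem.Set.add acc := by
  induction rs with
  | nil => intro acc; rfl
  | cons r rest ih =>
      intro acc
      simp only [List.foldl_cons, List.filterMap_cons, pvAStep_eq acc r]
      cases translate_one r with
      | none => exact ih acc
      | some f => simpa using ih (PySem.Set.add acc f)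

-- first-occurrence dedup by head-emission (proof-only helper)
def pvEmit : List String → List String
  | [] => []
  | h :: t => h :: pvEmit (t.filter (fun v => v != h))
  termination_by l => l.length
  decreasing_by simpa using Nat.lt_succ_of_le (List.length_filter_le _ t)

theorem pvEmit_nil : pvEmit [] = [] := by rw [pvEmit]

theorem pvEmit_cons (h : String) (t : List String) :
    pvEmit (h :: t) = h :: pvEmit (t.filter (fun v => v != h)) := by rw [pvEmit]

-- the seen-set fold is acc ++ head-emission of the not-yet-seen elements
theorem pvFoldAdd_emit (l : List String) : ∀ acc : List String,
    l.foldl PySem.Set.add acc = acc ++ pvEmit (l.filter (fun x => !acc.contains x)) := by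
  induction l with
  | nil => intro acc; simp [pvEmit_nil]
  | cons x t ih =>
      intro acc
      by_cases hx : acc.contains x = true
      · have hmem : x ∈ acc := by simpa using hx
        have hkeep : PySem.Set.add acc x = acc := by
          simp [PySem.Set.add, PySem.Set.contains, hmem]
        have hcond : (fun a => !acc.contains a) x = false := by simp [hmem]
        simp only [List.foldl_cons, hkeep, List.filter_cons, hcond, ih]
        simp
      · have hmem : x ∉ acc := by simpa using hx
        have hadd : PySem.Set.add acc x = acc ++ [x] := by
          simp [PySem.Set.add, PySem.Set.contains, hmem]
        have hcond : (fun a => !acc.contains a) x = true := by simp [hmem]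
        simp only [List.foldl_cons, hadd, ih, List.filter_cons, hcond, if_pos, pvEmit_cons,
          List.append_assoc, List.singleton_append]
        congr 2
        rw [List.filter_filter]
        congr 1
        exact List.filter_congr (fun a _ => by by_cases hax : a = x <;> simp [hax, hmem])

-- take_distinct is the k-prefix of head-emission dedup
theorem pvTakeDistinct_eq (k : Nat) : ∀ l : List String,
    take_distinct l k = (pvEmit l).take k := by
  induction k with
  | zero => intro l; cases l <;> rfl
  | succ k ih =>
      intro l
      cases l with
      | nil => simp [take_distinct, pvEmit_nil]
      | cons h t => rw [take_distinct, pvEmit_cons, List.take_succ_cons, ih]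

-- ===== VERDICT (by name: the statement is the Claim_ definition above) =====
theorem translate_reasons_spec : Claim_equal_translate_reasons := by
  intro trs _
  show translate_reasons trs = translate_reasons_alt trs
  have h5 : PySem.List.slice (pvEmit (trs.filterMap translate_one)) none (some ((5 : Nat) : Int)) = (pvEmit (trs.filterMap translate_one)).take 5 :=
    PySem.List.slice_to_natCast _ _
  simp only [translate_reasons, translate_reasons_alt, pvFold_eq, pvFoldAdd_emit,
    List.nil_append, pvTakeDistinct_eq]
  simpa using h5
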